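-- pv_equiv track=rewrite | github.com/DieRekT/TROVE | backend/kingfisher/summarizer.py | summarize_cards
-- ===== SOURCE A (Python) =====
-- from typing import Any, Dict, List
--
-- def summarize_cards(cards: List[Dict[str, Any]]) -> str:
--     """
--     Summarize a list of Kingfisher cards into text.
--
--     Args:
--         cards: List of card dictionaries with type, title, content, metadata
--
--     Returns:
--         Summary text string
--     """
--     if not cards:
--         return "No cards to summarize."
--
--     # Group by type
--     by_type: Dict[str, List[Dict[str, Any]]] = {}
--     for card in cards:
--         card_type = card.get("type", "object")
--         if card_type not in by_type:
--             by_type[card_type] = []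
--         by_type[card_type].append(card)
--
--     # Build summary
--     parts = []
--     for card_type in ["quote", "event", "person", "place", "object"]:
--         if card_type in by_type:
--             items = by_type[card_type]
--             parts.append(f"{card_type.capitalize()}s ({len(items)}):")
--             for item in items[:3]:  # Show first 3
--                 title = item.get("title", "")
--                 content = item.get("content", "")[:100]
--                 parts.append(f"  - {title}: {content}...")
--             if len(items) > 3:
--                 parts.append(f"  ... and {len(items) - 3} more")
--
--     return "\n".join(parts) if parts else "Summary unavailable."
-- ===== SOURCE B (Python) =====
-- TYPES = ["quote", "event", "person", "place", "object"]
--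
--
-- def _fmt(item):
--     return f"  - {item.get('title', '')}: {item.get('content', '')[:100]}..."
--
--
-- def summarize_cards(cards):
--     if not cards:
--         return "No cards to summarize."
--     parts = []
--     for t in TYPES:
--         items = [c for c in cards if c.get("type", "object") == t]
--         if items:
--             section = [f"{t.capitalize()}s ({len(items)}):"]
--             section += [_fmt(i) for i in items[:3]]
--             if len(items) > 3:
--                 section.append(f"  ... and {len(items) - 3} more")
--             parts += section
--     return "\n".join(parts) if parts else "Summary unavailable."
-- ===== Notes on version B (the rewrite author's own statement) =====
-- stated objective: simpler
-- what changed: B drops A's by-type dict-grouping pass entirely and instead, for each of the five fixed types, filters the card list directly and emits that type's section in one comprehension-based step.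
import Mathlib
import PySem

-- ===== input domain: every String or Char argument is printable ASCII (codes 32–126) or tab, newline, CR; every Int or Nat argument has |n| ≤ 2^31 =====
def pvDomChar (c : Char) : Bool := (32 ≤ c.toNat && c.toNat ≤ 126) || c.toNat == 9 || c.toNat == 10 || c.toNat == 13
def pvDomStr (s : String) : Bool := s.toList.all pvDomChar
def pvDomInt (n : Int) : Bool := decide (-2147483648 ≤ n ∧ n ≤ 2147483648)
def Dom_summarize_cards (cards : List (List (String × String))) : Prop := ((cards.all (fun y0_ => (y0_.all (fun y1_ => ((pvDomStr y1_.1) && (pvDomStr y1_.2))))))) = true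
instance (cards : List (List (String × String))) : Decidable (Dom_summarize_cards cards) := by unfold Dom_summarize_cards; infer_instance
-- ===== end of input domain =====

-- B replaces A's by-type dict grouping with a direct filter of the card list per fixed type (different decomposition, same output).

-- s.capitalize(): first character uppercased, the rest lowercased (exact on the ASCII domain; used by both Pythons)
def pyCapitalize (s : String) : String :=
  match s.toList with
  | [] => ""
  | c :: cs => String.ofList (PySem.Chars.upperChar c :: PySem.Chars.lower cs)

-- ===== PORT A =====
def summarize_cards (cards : List (List (String × String))) : String :=
  if cards = [] then "No cards to summarize."
  else
    -- Group by type (card.get("type","object"); 'if ct not in by_type: by_type[ct] = []; by_type[ct].append(card)')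
    let by_type : PySem.Dict String (List (List (String × String))) :=
      cards.foldl (fun d card =>
        let card_type := (PySem.Dict.mk card).getD "type" "object"
        let d := if d.contains card_type = false then d.insert card_type [] else d
        d.insert card_type (d.getD card_type [] ++ [card])) PySem.Dict.empty
    -- Build summary ('if card_type in by_type: items = by_type[card_type]; …')
    let parts : List String :=
      ["quote", "event", "person", "place", "object"].foldl (fun parts card_type =>
        if by_type.contains card_type then
          let items := by_type.getD card_type []
          let parts := parts ++
            [pyCapitalize card_type ++ "s (" ++ PySem.Int.toStr (items.length : Int) ++ "):"]
          let parts := (PySem.List.slice items none (some 3)).foldl (fun parts item =>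
            let title := (PySem.Dict.mk item).getD "title" ""
            let content := PySem.Str.slice ((PySem.Dict.mk item).getD "content" "") none (some 100)
            parts ++ ["  - " ++ title ++ ": " ++ content ++ "..."]) parts
          if 3 < items.length then
            parts ++ ["  ... and " ++ PySem.Int.toStr ((items.length : Int) - 3) ++ " more"]
          else parts
        else parts) []
    if parts ≠ [] then PySem.Str.join "\n" parts else "Summary unavailable."

-- ===== PORT B =====
def fmtCard (item : List (String × String)) : String :=
  let title := (PySem.Dict.mk item).getD "title" ""
  let content := PySem.Str.slice ((PySem.Dict.mk item).getD "content" "") none (some 100)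
  "  - " ++ title ++ ": " ++ content ++ "..."

def summarize_cards_alt (cards : List (List (String × String))) : String :=
  if cards = [] then "No cards to summarize."
  else
    let parts : List String :=
      ["quote", "event", "person", "place", "object"].foldl (fun parts t =>
        let items := cards.filter (fun c => (PySem.Dict.mk c).getD "type" "object" == t)
        if items ≠ [] then
          let sec := [pyCapitalize t ++ "s (" ++ PySem.Int.toStr (items.length : Int) ++ "):"]
          let sec := sec ++ (PySem.List.slice items none (some 3)).map fmtCard
          let sec := if 3 < items.length then
              sec ++ ["  ... and " ++ PySem.Int.toStr ((items.length : Int) - 3) ++ " more"]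
            else sec
          parts ++ sec
        else parts) []
    if parts ≠ [] then PySem.Str.join "\n" parts else "Summary unavailable."

-- ===== PRECONDITION & SPEC =====
def Spec_summarize_cards (cards : List (List (String × String))) (out : String) : Prop := out = summarize_cards_alt cards
instance (cards : List (List (String × String))) (out : String) : Decidable (Spec_summarize_cards cards out) := by unfold Spec_summarize_cards; infer_instance

-- ===== CLAIM (what is proved, stated in full; the proofs are below) =====
def Claim_equal_summarize_cards : Prop := ∀ (cards : List (List (String × String))), Dom_summarize_cards cards → Spec_summarize_cards cards (summarize_cards cards)

-- ===== LEMMAS AND PROOFS =====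

-- names (definitionally equal to the ports' sub-terms) for A's key, grouping step and dict, and both per-type steps
def pvKey (c : List (String × String)) : String := (PySem.Dict.mk c).getD "type" "object"

def pvStep (d : PySem.Dict String (List (List (String × String)))) (card : List (String × String)) :
    PySem.Dict String (List (List (String × String))) :=
  let card_type := pvKey card
  let d := if d.contains card_type = false then d.insert card_type [] else d
  d.insert card_type (d.getD card_type [] ++ [card])

def pvDict (cards : List (List (String × String))) : PySem.Dict String (List (List (String × String))) :=
  cards.foldl pvStep PySem.Dict.empty

def pvStepA (cards : List (List (String × String))) (parts : List String) (card_type : String) : List String :=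
  if (pvDict cards).contains card_type then
    let items := (pvDict cards).getD card_type []
    let parts := parts ++
      [pyCapitalize card_type ++ "s (" ++ PySem.Int.toStr (items.length : Int) ++ "):"]
    let parts := (PySem.List.slice items none (some 3)).foldl
      (fun parts item => parts ++ [fmtCard item]) parts
    if 3 < items.length then
      parts ++ ["  ... and " ++ PySem.Int.toStr ((items.length : Int) - 3) ++ " more"]
    else parts
  else parts

def pvStepB (cards : List (List (String × String))) (parts : List String) (t : String) : List String :=
  let items := cards.filter (fun c => pvKey c == t)
  if items ≠ [] then
    let sec := [pyCapitalize t ++ "s (" ++ PySem.Int.toStr (items.length : Int) ++ "):"]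
    let sec := sec ++ (PySem.List.slice items none (some 3)).map fmtCard
    let sec := if 3 < items.length then
        sec ++ ["  ... and " ++ PySem.Int.toStr ((items.length : Int) - 3) ++ " more"]
      else sec
    parts ++ sec
  else parts

theorem pvStep_getD (d : PySem.Dict String (List (List (String × String))))
    (card : List (String × String)) (t : String) :
    (pvStep d card).getD t [] = d.getD t [] ++ (if pvKey card = t then [card] else []) := by
  by_cases ht : t = pvKey card
  · subst ht
    simp only [pvStep]
    by_cases hc : d.contains (pvKey card) = false
    · rw [if_pos hc, PySem.Dict.getD_insert, if_pos rfl, PySem.Dict.getD_insert, if_pos rfl,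
        PySem.Dict.getD_of_not_contains _ _ hc]
      simp
    · rw [if_neg hc, PySem.Dict.getD_insert, if_pos rfl]
      simp
  · have ht' : ¬ pvKey card = t := fun h => ht h.symm
    simp only [pvStep]
    by_cases hc : d.contains (pvKey card) = false
    · rw [if_pos hc, PySem.Dict.getD_insert, if_neg ht, PySem.Dict.getD_insert, if_neg ht]
      simp [ht']
    · rw [if_neg hc, PySem.Dict.getD_insert, if_neg ht]
      simp [ht']

theorem pvStep_contains (d : PySem.Dict String (List (List (String × String))))
    (card : List (String × String)) (t : String) :
    (pvStep d card).contains t = (d.contains t || (pvKey card == t)) := by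
  have hbeq : (t == pvKey card) = (pvKey card == t) := by
    rw [Bool.eq_iff_iff]; constructor <;> (intro h; simp_all)
  simp only [pvStep]
  by_cases hc : d.contains (pvKey card) = false
  · rw [if_pos hc, PySem.Dict.contains_insert, PySem.Dict.contains_insert, hbeq]
    cases pvKey card == t <;> simp
  · rw [if_neg hc, PySem.Dict.contains_insert, hbeq]
    cases pvKey card == t <;> simp

theorem pvFold_getD (cards : List (List (String × String)))
    (d : PySem.Dict String (List (List (String × String)))) (t : String) :
    (cards.foldl pvStep d).getD t [] = d.getD t [] ++ cards.filter (fun c => pvKey c == t) := by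
  induction cards generalizing d with
  | nil => simp
  | cons c cs ih =>
    simp only [List.foldl_cons, ih, pvStep_getD, List.filter_cons]
    by_cases h : pvKey c = t <;> simp [h]

theorem pvFold_contains (cards : List (List (String × String)))
    (d : PySem.Dict String (List (List (String × String)))) (t : String) :
    (cards.foldl pvStep d).contains t = (d.contains t || cards.any (fun c => pvKey c == t)) := by
  induction cards generalizing d with
  | nil => simp
  | cons c cs ih =>
    simp only [List.foldl_cons, ih, pvStep_contains, List.any_cons]
    cases d.contains t <;> cases h : (pvKey c == t) <;> simp

theorem pv_hstep (cards : List (List (String × String))) (parts : List String) (t : String) :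
    pvStepA cards parts t = pvStepB cards parts t := by
  simp only [pvStepA, pvStepB, pvDict]
  rw [pvFold_contains, pvFold_getD]
  simp only [PySem.Dict.contains_empty, PySem.Dict.getD_empty, Bool.false_or, List.nil_append]
  by_cases hfil : cards.filter (fun c => pvKey c == t) = []
  · have hany : (cards.any fun c => pvKey c == t) = false := by
      by_contra h
      rw [Bool.not_eq_false, List.any_eq_true] at h
      rcases h with ⟨c, hc, hb⟩
      have hmem : c ∈ cards.filter (fun c => pvKey c == t) := List.mem_filter.mpr ⟨hc, hb⟩
      rw [hfil] at hmem
      simp at hmem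
    simp [hany, hfil]
  · have hany : (cards.any fun c => pvKey c == t) = true := by
      rcases List.ne_nil_iff_exists_cons.mp hfil with ⟨c, cs, hcons⟩
      have hm : c ∈ cards.filter (fun c => pvKey c == t) := by
        rw [hcons]; exact List.mem_cons_self
      rcases List.mem_filter.mp hm with ⟨h1, h2⟩
      exact List.any_eq_true.mpr ⟨c, h1, h2⟩
    simp only [hany, hfil, ite_true, ne_eq, not_false_eq_true,
      PySem.List.foldl_append_singleton_eq_map]
    by_cases h3 : 3 < (cards.filter (fun c => pvKey c == t)).length <;>
      simp [h3, List.append_assoc]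

theorem pv_parts (cards : List (List (String × String))) (l : List String)
    (parts : List String) :
    l.foldl (pvStepA cards) parts = l.foldl (pvStepB cards) parts := by
  induction l generalizing parts with
  | nil => rfl
  | cons x xs ih =>
    simp only [List.foldl_cons, pv_hstep]
    exact ih _

theorem pv_main (cards : List (List (String × String))) :
    summarize_cards cards = summarize_cards_alt cards := by
  unfold summarize_cards summarize_cards_alt
  by_cases hnil : cards = []
  · rw [if_pos hnil, if_pos hnil]
  · rw [if_neg hnil, if_neg hnil]
    exact congrArg
      (fun parts : List String =>
        if parts ≠ [] then PySem.Str.join "\n" parts else "Summary unavailable.")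
      (pv_parts cards ["quote", "event", "person", "place", "object"] [])

-- ===== VERDICT (by name: the statement is the Claim_ definition above) =====
theorem summarize_cards_spec : Claim_equal_summarize_cards := by
  intro cards _
  unfold Spec_summarize_cards
  exact pv_main cards
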